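-- pv_equiv track=rewrite | github.com/super30admin/Hashing-1 | GroupingAnagrams.py | primekey
-- ===== SOURCE A (Python) =====
-- def primekey(s):
--     # pr = [2, 3, 5, 7, 11, 13, 17, 19, 23, 29, 31, 37, 41, 43, 47, 53, 59, 61, 67, 71, 73, 79, 83, 89, 97, 101, 103]
--
--     # Calculate 26 prime numbers
--     pr = []
--     for num in range(2, 105):
--         prime = True
--         for i in range(2, num):
--             if (num % i == 0):
--                 prime = False
--         if prime:
--             pr.append(num)
--     # calculate unique key
--     ans = 1
--     # iterate through each letter in the string
--     for i in s:
--         # calculate the ascii value of each letter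
--         ch = ord(i)
--
--         # multiply the unique prime numbers mapped in the pr list from the difference between the ascii value of letter and a
--         ans *=pr[ch-ord("a")]
--
--     # return the unique key
--     return ans
-- ===== SOURCE B (Python) =====
-- def primekey(s):
--     # Sieve of Eratosthenes over 0..104 instead of nested trial division.
--     sieve = [True] * 105
--     sieve[0] = sieve[1] = False
--     for p in range(2, 105):
--         if sieve[p]:
--             for m in range(p * p, 105, p):
--                 sieve[m] = False
--     pr = [n for n in range(105) if sieve[n]]
--     ans = 1
--     for c in s:
--         ans *= pr[ord(c) - ord("a")]
--     return ans
-- ===== Notes on version B (the rewrite author's own statement) =====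
-- stated objective: idiomatic
-- what changed: Prime table built by a sieve of Eratosthenes over a boolean array of size 105 (strike multiples, collect unmarked) instead of quadratic trial division over range(2,num); the product phase is unchanged.
import Mathlib
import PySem

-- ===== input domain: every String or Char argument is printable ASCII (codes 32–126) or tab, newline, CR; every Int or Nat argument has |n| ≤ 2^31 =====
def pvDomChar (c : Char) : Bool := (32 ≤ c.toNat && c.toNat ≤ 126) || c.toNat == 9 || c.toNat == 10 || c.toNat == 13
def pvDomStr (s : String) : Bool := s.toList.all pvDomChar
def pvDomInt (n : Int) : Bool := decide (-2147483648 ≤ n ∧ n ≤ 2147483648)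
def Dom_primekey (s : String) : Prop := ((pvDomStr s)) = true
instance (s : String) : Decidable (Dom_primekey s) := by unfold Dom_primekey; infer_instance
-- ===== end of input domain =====

-- B replaces A's quadratic trial-division prime table by a sieve of Eratosthenes (idiomatic); the product phase is unchanged.

-- ===== PORT A =====
-- A's prime table: trial division, num in range(2,105), inner loop i in range(2,num)
def pvPrA : List Int :=
  (PySem.List.pyRange 2 105 1).foldl (fun pr num =>
    let prime := (PySem.List.pyRange 2 num 1).foldl
      (fun prime i => if PySem.Int.mod num i = 0 then false else prime) true
    if prime then pr ++ [num] else pr) []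

-- ans *= pr[ch - ord('a')]; Python negative indexing via pyGet?; Pre_ excludes the none (IndexError) case
def primekey (s : String) : Int :=
  s.toList.foldl (fun ans c =>
    ans * ((PySem.List.pyGet? pvPrA ((c.toNat : Int) - 97)).getD 0)) 1

-- ===== PORT B =====
-- sieve[0]=sieve[1]=False; strike multiples of each remaining p starting at p*p
def pvSieve : List Bool :=
  (PySem.List.pyRange 2 105 1).foldl (fun sv p =>
    if sv.getD p.toNat false then
      (PySem.List.pyRange (p * p) 105 p).foldl (fun sv m => sv.set m.toNat false) sv
    else sv) (((List.replicate 105 true).set 0 false).set 1 false)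

def pvPrB : List Int :=
  (PySem.List.pyRange 0 105 1).filter (fun n => pvSieve.getD n.toNat false)

def primekey_alt (s : String) : Int :=
  s.toList.foldl (fun ans c =>
    ans * ((PySem.List.pyGet? pvPrB ((c.toNat : Int) - 97)).getD 0)) 1

-- ===== PRECONDITION & SPEC =====
-- Exactly the inputs where Python A returns: every character's index ord(c)-97 is a valid
-- (possibly negative, wrapping) index into the 27-element prime table, i.e. 70 ≤ ord(c) ≤ 123;
-- outside this A (and B) raise IndexError.
def Pre_primekey (s : String) : Prop :=
  (s.toList.all (fun c => 70 ≤ c.toNat && c.toNat ≤ 123)) = true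
instance (s : String) : Decidable (Pre_primekey s) := by unfold Pre_primekey; infer_instance

def pvWitness_primekey : String := "abc"

def Spec_primekey (s : String) (out : Int) : Prop := out = primekey_alt s
instance (s : String) (out : Int) : Decidable (Spec_primekey s out) := by unfold Spec_primekey; infer_instance

-- ===== CLAIM (what is proved, stated in full; the proofs are below) =====
def Claim_equal_primekey : Prop := ∀ (s : String), Dom_primekey s → Pre_primekey s → Spec_primekey s (primekey s)

-- ===== LEMMAS AND PROOFS =====
-- The two closed prime tables coincide (both are the 27 primes 2..103).
set_option maxRecDepth 10000 in
theorem pvPr_eq : pvPrA = pvPrB := by decide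

-- ===== VERDICT (by name: the statement is the Claim_ definition above) =====
theorem primekey_spec : Claim_equal_primekey := by
  intro s _ _
  unfold Spec_primekey primekey primekey_alt
  rw [pvPr_eq]
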